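-- pv_equiv track=rewrite | github.com/Polovnevya/python_core | Lessons/Lesson_4/Homework_6.py | iter_cycle
-- ===== SOURCE A (Python) =====
-- from itertools import count, cycle
--
-- def iter_cycle(my_list, stop):
--     my_count = 0
--     my_inner_list = list()
--     for el in cycle(my_list):
--         if my_count > stop:
--             break
--         else:
--             my_inner_list.append(el)
--             my_count = my_count + 1
--     return my_inner_list
-- ===== SOURCE B (Python) =====
-- def iter_cycle(my_list, stop):
--     if not my_list:
--         return []
--     n = len(my_list)
--     return [my_list[i % n] for i in range(stop + 1)]
-- ===== Notes on version B (the rewrite author's own statement) =====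
-- stated objective: idiomatic
-- what changed: Replaces draining an infinite cycle iterator with a manual counter and break by direct modulo indexing over range(stop+1); empty list guarded, negative stop gives [] via the empty range.
import Mathlib
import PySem

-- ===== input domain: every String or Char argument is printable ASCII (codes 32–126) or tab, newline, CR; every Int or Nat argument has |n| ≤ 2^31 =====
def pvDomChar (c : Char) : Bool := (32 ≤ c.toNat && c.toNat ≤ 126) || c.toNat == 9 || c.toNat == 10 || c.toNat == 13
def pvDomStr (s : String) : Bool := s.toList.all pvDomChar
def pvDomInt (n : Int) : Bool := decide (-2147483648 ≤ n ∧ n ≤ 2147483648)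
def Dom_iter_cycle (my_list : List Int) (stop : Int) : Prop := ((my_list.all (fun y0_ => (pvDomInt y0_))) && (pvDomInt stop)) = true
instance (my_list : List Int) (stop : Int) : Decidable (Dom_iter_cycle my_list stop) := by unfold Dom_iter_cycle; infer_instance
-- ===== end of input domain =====

-- B replaces A's cycle-iterator draining (counter + break) by direct modulo indexing over a range (objective: idiomatic).

-- ===== PORT A =====
-- The for-loop over cycle(my_list): `cur` is the remaining part of the current pass over
-- the list; when it is exhausted the cycle restarts (or, for an empty list, the iterator
-- ends). The restart is fused with drawing the next element (behaviourally identical,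
-- since the `my_count > stop` test does not use the drawn element) so the counter measure decreases.
def iterCycleGo (orig : List Int) (stop : Int) : List Int → Int → List Int → List Int
  | cur, cnt, acc =>
    match cur with
    | [] =>
      match orig with
      | [] => acc.reverse                    -- cycle([]) is empty: loop ends
      | o :: os =>
        if cnt > stop then acc.reverse
        else iterCycleGo orig stop os (cnt + 1) (o :: acc)
    | el :: rest =>
      if cnt > stop then acc.reverse
      else iterCycleGo orig stop rest (cnt + 1) (el :: acc)
  termination_by cur cnt _ => (stop + 1 - cnt).toNat
  decreasing_by all_goals (simp_wf; omega)

def iter_cycle (my_list : List Int) (stop : Int) : List Int :=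
  iterCycleGo my_list stop my_list 0 []

-- ===== PORT B =====
def iter_cycle_alt (my_list : List Int) (stop : Int) : List Int :=
  if my_list = [] then []
  else
    -- [my_list[i % n] for i in range(stop + 1)]; i % n is always in range, so the
    -- defaulted lookup is exact Python indexing here
    (PySem.List.pyRange 0 (stop + 1) 1).map
      (fun i => PySem.List.pyGetD my_list (PySem.Int.mod i (my_list.length : Int)) 0)

-- ===== PRECONDITION & SPEC =====
def Spec_iter_cycle (my_list : List Int) (stop : Int) (out : List Int) : Prop := out = iter_cycle_alt my_list stop
instance (my_list : List Int) (stop : Int) (out : List Int) : Decidable (Spec_iter_cycle my_list stop out) := by unfold Spec_iter_cycle; infer_instance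

-- ===== CLAIM (what is proved, stated in full; the proofs are below) =====
def Claim_equal_iter_cycle : Prop := ∀ (my_list : List Int) (stop : Int), Dom_iter_cycle my_list stop → Spec_iter_cycle my_list stop (iter_cycle my_list stop)

-- ===== LEMMAS AND PROOFS =====

theorem pv_mod_succ (c n : Nat) (hn : 0 < n) :
    (c + 1) % n = if c % n + 1 = n then 0 else c % n + 1 := by
  have hd : c % n < n := Nat.mod_lt _ hn
  by_cases h1 : n = 1
  · simp [h1, Nat.mod_one]
  · have h2 : 1 < n := by omega
    rw [Nat.add_mod, Nat.mod_eq_of_lt h2]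
    by_cases h : c % n + 1 = n
    · rw [h, Nat.mod_self]; simp [h]
    · rw [Nat.mod_eq_of_lt (by omega)]; simp [h]

theorem pv_go_spec (orig : List Int) (h : orig ≠ []) (stop : Int) :
    ∀ (m c : Nat) (cur acc : List Int),
      m = (stop + 1 - (c : Int)).toNat →
      (cur = orig.drop (c % orig.length) ∨ (cur = [] ∧ c % orig.length = 0)) →
      iterCycleGo orig stop cur (c : Int) acc
        = acc.reverse ++ (List.range m).map (fun k => orig.getD ((c + k) % orig.length) 0) := by
  have hn : 0 < orig.length := List.length_pos_iff.mpr h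
  intro m
  induction m with
  | zero =>
    intro c cur acc hm _
    have hc : stop < (c : Int) := by omega
    cases cur with
    | nil =>
      cases orig with
      | nil => simp at h
      | cons o os => rw [iterCycleGo]; simp [hc]
    | cons el rest => rw [iterCycleGo]; simp [hc]
  | succ m ih =>
    intro c cur acc hm hinv
    have hc : ¬ ((c : Int) > stop) := by omega
    have hd : c % orig.length < orig.length := Nat.mod_lt _ hn
    have hm' : m = (stop + 1 - ((c + 1 : Nat) : Int)).toNat := by push_cast; omega
    have hrange : List.range (m + 1) = 0 :: (List.range m).map Nat.succ :=
      List.range_succ_eq_map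
    have hcast : (c : Int) + 1 = ((c + 1 : Nat) : Int) := by push_cast; ring
    rcases hinv with hcur | ⟨hcur, hc0⟩
    · -- cur is the (nonempty) remaining suffix of the current pass
      have hne : cur ≠ [] := by
        rw [hcur]; intro hx
        have := List.drop_eq_nil_iff.mp hx
        omega
      obtain ⟨el, rest, hel⟩ := List.exists_cons_of_ne_nil hne
      have hdrop : orig.drop (c % orig.length)
          = orig[c % orig.length] :: orig.drop (c % orig.length + 1) :=
        List.drop_eq_getElem_cons hd
      rw [hel, hdrop] at hcur
      have hel1 : el = orig[c % orig.length] := (List.cons.injEq _ _ _ _ ▸ hcur).1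
      have hel2 : rest = orig.drop (c % orig.length + 1) := (List.cons.injEq _ _ _ _ ▸ hcur).2
      rw [hel, iterCycleGo]
      simp only [if_neg hc]
      rw [hcast, ih (c + 1) rest (el :: acc) hm' ?_]
      · rw [hrange]
        simp only [List.map_cons, List.map_map, List.reverse_cons, List.append_assoc,
          List.singleton_append, Nat.add_zero, Function.comp_def]
        congr 1
        congr 1
        · rw [hel1, List.getD_eq_getElem orig 0 hd]
        · apply List.map_congr_left
          intro k _
          rw [Nat.succ_eq_add_one, show c + 1 + k = c + (k + 1) from by omega]
      · -- invariant at c + 1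
        rw [pv_mod_succ c _ hn]
        by_cases hend : c % orig.length + 1 = orig.length
        · exact Or.inr ⟨by rw [hel2, hend, List.drop_length], by simp [hend]⟩
        · exact Or.inl (by simp [hend, hel2])
    · -- current pass exhausted: the cycle restarts
      cases orig with
      | nil => simp at h
      | cons o os =>
        rw [hcur, iterCycleGo]
        simp only [if_neg hc]
        rw [hcast, ih (c + 1) os (o :: acc) hm' ?_]
        · rw [hrange]
          simp only [List.map_cons, List.map_map, List.reverse_cons, List.append_assoc,
            List.singleton_append, Nat.add_zero, Function.comp_def]
          congr 1
          congr 1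
          · rw [hc0]; simp
          · apply List.map_congr_left
            intro k _
            rw [Nat.succ_eq_add_one, show c + 1 + k = c + (k + 1) from by omega]
        · rw [pv_mod_succ c _ hn, hc0]
          simp only [Nat.zero_add]
          by_cases hend : (1 : Nat) = (o :: os).length
          · refine Or.inr ⟨?_, by rw [if_pos hend]⟩
            have hlen : os.length = 0 := by
              have := hend
              simp only [List.length_cons] at this
              omega
            exact List.eq_nil_of_length_eq_zero hlen
          · refine Or.inl ?_
            rw [if_neg hend]
            rfl

theorem pv_alt_eq (my_list : List Int) (stop : Int) (h : my_list ≠ []) :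
    iter_cycle_alt my_list stop
      = (List.range (stop + 1).toNat).map
          (fun k => my_list.getD (k % my_list.length) 0) := by
  unfold iter_cycle_alt
  rw [if_neg h, PySem.List.pyRange_one, List.map_map]
  simp only [sub_zero]
  apply List.map_congr_left
  intro k _
  simp only [Function.comp_apply, zero_add, PySem.Int.mod_natCast, PySem.List.pyGetD_natCast]

-- ===== VERDICT (by name: the statement is the Claim_ definition above) =====
theorem iter_cycle_spec : Claim_equal_iter_cycle := by
  intro my_list stop _
  unfold Spec_iter_cycle iter_cycle
  by_cases h : my_list = []
  · subst h
    rw [iterCycleGo]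
    simp [iter_cycle_alt]
  · rw [show (0 : Int) = ((0 : Nat) : Int) from rfl,
      pv_go_spec my_list h stop (stop + 1).toNat 0 my_list [] (by omega)
        (Or.inl (by simp)),
      pv_alt_eq my_list stop h]
    simp
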